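-- pv_equiv track=rewrite | github.com/myeongjunkim/Algorithm | 백준/Gold/11058. 크리보드/크리보드.py | solution
-- ===== SOURCE A (Python) =====
-- def solution(N):
--
--   dp = [ 0 for _ in range(N+1) ]
--   if N < 7:
--     return N
--   else:
--     for i in range(N+1):
--       dp[i] = i if i < 7 else max( 2*dp[i-3], 3*dp[i-4], 4*dp[i-5] )
--
--   return dp[N]
-- ===== SOURCE B (Python) =====
-- def solution(N):
--     if N < 7:
--         return N
--     if N < 11:
--         return (9, 12, 16, 20)[N - 7]
--     q, r = divmod(N - 11, 5)
--     return (27, 36, 48, 64, 81)[r] * 4 ** q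
-- ===== Notes on version B (the rewrite author's own statement) =====
-- stated objective: faster
-- what changed: Replaces the bottom-up dp-array loop by a closed form: past a small base table the recurrence stabilises to a constant ratio every five steps, so B returns a table entry times one fast power of four instead of filling the whole array.
import Mathlib
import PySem

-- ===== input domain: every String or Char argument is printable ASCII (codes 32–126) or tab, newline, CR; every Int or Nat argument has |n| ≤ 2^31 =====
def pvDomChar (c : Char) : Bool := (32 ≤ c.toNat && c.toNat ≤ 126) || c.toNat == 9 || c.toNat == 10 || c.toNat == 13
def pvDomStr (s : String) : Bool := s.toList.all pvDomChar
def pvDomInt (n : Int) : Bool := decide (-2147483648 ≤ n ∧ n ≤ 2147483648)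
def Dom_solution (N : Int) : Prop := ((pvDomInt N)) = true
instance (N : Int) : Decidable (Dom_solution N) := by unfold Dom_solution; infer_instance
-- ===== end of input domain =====

-- B replaces A's O(N) bottom-up dp loop by a closed form (dp[n] = 4*dp[n-5] stabilises for n >= 16): table lookup plus one power of 4 (objective: faster).


-- ===== PORT A =====
-- the body of A's for-loop: dp[i] = i if i < 7 else max(2*dp[i-3], 3*dp[i-4], 4*dp[i-5])
def kriStep (dp : List Int) (i : Int) : List Int :=
  PySem.List.pySetD dp i
    (if i < 7 then i
     else max (2 * PySem.List.pyGetD dp (i - 3) 0)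
          (max (3 * PySem.List.pyGetD dp (i - 4) 0)
               (4 * PySem.List.pyGetD dp (i - 5) 0)))

def solution (N : Int) : Int :=
  let dp := (PySem.List.pyRange 0 (N + 1) 1).map (fun _ => (0 : Int))
  if N < 7 then N
  else
    let dp := (PySem.List.pyRange 0 (N + 1) 1).foldl kriStep dp
    PySem.List.pyGetD dp N 0

-- ===== PORT B =====
def solution_alt (N : Int) : Int :=
  if N < 7 then N
  else if N < 11 then PySem.List.pyGetD [9, 12, 16, 20] (N - 7) 0
  else
    let q := PySem.Int.floordiv (N - 11) 5
    let r := PySem.Int.mod (N - 11) 5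
    -- 4 ** q: on this branch q >= 0, so Python's 4 ** q is exactly 4 ^ q.toNat
    PySem.List.pyGetD [27, 36, 48, 64, 81] r 0 * 4 ^ q.toNat

-- ===== PRECONDITION & SPEC =====
def Spec_solution (N : Int) (out : Int) : Prop := out = solution_alt N
instance (N : Int) (out : Int) : Decidable (Spec_solution N out) := by unfold Spec_solution; infer_instance

-- ===== CLAIM (what is proved, stated in full; the proofs are below) =====
def Claim_equal_solution : Prop := ∀ (N : Int), Dom_solution N → Spec_solution N (solution N)

-- ===== LEMMAS AND PROOFS =====

-- pure form of A's dp recurrence, the bridge between the two ports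
def kriF : Nat → Int
  | n =>
    if h : n < 7 then (n : Int)
    else max (2 * kriF (n - 3)) (max (3 * kriF (n - 4)) (4 * kriF (n - 5)))
  decreasing_by all_goals omega

theorem kriF_lt7 {n : Nat} (h : n < 7) : kriF n = (n : Int) := by
  rw [kriF]; simp [h]

theorem kriF_ge7 {n : Nat} (h : ¬ n < 7) :
    kriF n = max (2 * kriF (n - 3)) (max (3 * kriF (n - 4)) (4 * kriF (n - 5))) := by
  rw [kriF]; simp [h]

-- B's base table for residues of (n - 11) mod 5
def kriT : Nat → Int
  | 0 => 27
  | 1 => 36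
  | 2 => 48
  | 3 => 64
  | _ => 81

theorem kriF_val7 : kriF 7 = 9 := by rw [kriF_ge7 (by norm_num)]; norm_num [kriF_lt7]
theorem kriF_val8 : kriF 8 = 12 := by rw [kriF_ge7 (by norm_num)]; norm_num [kriF_lt7]
theorem kriF_val9 : kriF 9 = 16 := by rw [kriF_ge7 (by norm_num)]; norm_num [kriF_lt7]
theorem kriF_val10 : kriF 10 = 20 := by rw [kriF_ge7 (by norm_num)]; norm_num [kriF_lt7, kriF_val7]
theorem kriF_val11 : kriF 11 = 27 := by rw [kriF_ge7 (by norm_num)]; norm_num [kriF_lt7, kriF_val7, kriF_val8]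
theorem kriF_val12 : kriF 12 = 36 := by rw [kriF_ge7 (by norm_num)]; norm_num [kriF_val7, kriF_val8, kriF_val9]
theorem kriF_val13 : kriF 13 = 48 := by rw [kriF_ge7 (by norm_num)]; norm_num [kriF_val8, kriF_val9, kriF_val10]
theorem kriF_val14 : kriF 14 = 64 := by rw [kriF_ge7 (by norm_num)]; norm_num [kriF_val9, kriF_val10, kriF_val11]
theorem kriF_val15 : kriF 15 = 81 := by rw [kriF_ge7 (by norm_num)]; norm_num [kriF_val10, kriF_val11, kriF_val12]

theorem kriMax3 (a b c p : Int) (hp : 0 ≤ p) (h1 : a ≤ c) (h2 : b ≤ c) :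
    max (a * p) (max (b * p) (c * p)) = c * p := by
  have g1 := mul_le_mul_of_nonneg_right h1 hp
  have g2 := mul_le_mul_of_nonneg_right h2 hp
  rw [max_eq_right g2, max_eq_right g1]

-- the closed form: kriF (11 + m) = kriT (m % 5) * 4 ^ (m / 5)
theorem kriF_closed : ∀ m : Nat, kriF (11 + m) = kriT (m % 5) * 4 ^ (m / 5) := by
  intro m
  induction m using Nat.strong_induction_on with
  | _ m ih =>
    by_cases h5 : m < 5
    · interval_cases m <;>
        norm_num [kriT, kriF_val11, kriF_val12, kriF_val13, kriF_val14, kriF_val15]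
    · have h7 : ¬ (11 + m) < 7 := by omega
      rw [kriF_ge7 h7]
      have e3 : 11 + m - 3 = 11 + (m - 3) := by omega
      have e4 : 11 + m - 4 = 11 + (m - 4) := by omega
      have e5 : 11 + m - 5 = 11 + (m - 5) := by omega
      rw [e3, e4, e5, ih (m - 3) (by omega), ih (m - 4) (by omega), ih (m - 5) (by omega)]
      obtain ⟨k, hk⟩ : ∃ k, m / 5 = k + 1 := ⟨m / 5 - 1, by omega⟩
      have hp : (0 : Int) ≤ 4 ^ k := by positivity
      have hcase : m % 5 = 0 ∨ m % 5 = 1 ∨ m % 5 = 2 ∨ m % 5 = 3 ∨ m % 5 = 4 := by omega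
      rcases hcase with h | h | h | h | h
      · rw [h, hk, show (m-3)%5 = 2 by omega, show (m-3)/5 = k by omega,
            show (m-4)%5 = 1 by omega, show (m-4)/5 = k by omega,
            show (m-5)%5 = 0 by omega, show (m-5)/5 = k by omega, pow_succ']
        simp only [kriT, ← mul_assoc]
        norm_num
      · rw [h, hk, show (m-3)%5 = 3 by omega, show (m-3)/5 = k by omega,
            show (m-4)%5 = 2 by omega, show (m-4)/5 = k by omega,
            show (m-5)%5 = 1 by omega, show (m-5)/5 = k by omega, pow_succ']
        simp only [kriT, ← mul_assoc]
        norm_num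
      · rw [h, hk, show (m-3)%5 = 4 by omega, show (m-3)/5 = k by omega,
            show (m-4)%5 = 3 by omega, show (m-4)/5 = k by omega,
            show (m-5)%5 = 2 by omega, show (m-5)/5 = k by omega, pow_succ']
        simp only [kriT, ← mul_assoc]
        norm_num
      · rw [h, hk, show (m-3)%5 = 0 by omega, show (m-3)/5 = k+1 by omega,
            show (m-4)%5 = 4 by omega, show (m-4)/5 = k by omega,
            show (m-5)%5 = 3 by omega, show (m-5)/5 = k by omega, pow_succ']
        simp only [kriT, ← mul_assoc]
        norm_num
        rw [kriMax3 216 243 256 _ hp (by norm_num) (by norm_num)]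
      · rw [h, hk, show (m-3)%5 = 1 by omega, show (m-3)/5 = k+1 by omega,
            show (m-4)%5 = 0 by omega, show (m-4)/5 = k+1 by omega,
            show (m-5)%5 = 4 by omega, show (m-5)/5 = k by omega, pow_succ']
        simp only [kriT, ← mul_assoc]
        norm_num

theorem kriT_pyGetD {r : Nat} (hr : r < 5) :
    PySem.List.pyGetD [27, 36, 48, 64, 81] (r : Int) 0 = kriT r := by
  interval_cases r <;> simp [kriT, PySem.List.pyGetD]

-- B's port equals the pure recurrence at N.toNat (for N ≥ 7)
theorem solution_alt_eq (N : Int) (h : ¬ N < 7) : solution_alt N = kriF N.toNat := by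
  unfold solution_alt
  rw [if_neg h]
  by_cases h11 : N < 11
  · rw [if_pos h11]
    have : N = 7 ∨ N = 8 ∨ N = 9 ∨ N = 10 := by omega
    rcases this with rfl | rfl | rfl | rfl <;>
      simp [PySem.List.pyGetD, kriF_val7, kriF_val8, kriF_val9, kriF_val10]
  · rw [if_neg h11]
    obtain ⟨n, rfl⟩ : ∃ n : Nat, N = ((11 + n : Nat) : Int) :=
      ⟨(N - 11).toNat, by omega⟩
    have hq : PySem.Int.floordiv (((11 + n : Nat) : Int) - 11) 5 = ((n / 5 : Nat) : Int) := by
      rw [PySem.Int.floordiv_eq_ediv_of_pos (by norm_num)]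
      push_cast
      rw [add_sub_cancel_left]
    have hr : PySem.Int.mod (((11 + n : Nat) : Int) - 11) 5 = (((n % 5 : Nat)) : Int) := by
      rw [PySem.Int.mod_eq_emod_of_pos (by norm_num)]
      push_cast
      rw [add_sub_cancel_left]
    simp only [hq, hr]
    rw [kriT_pyGetD (Nat.mod_lt n (by norm_num)), Int.toNat_natCast, Int.toNat_natCast,
        kriF_closed n]

-- loop invariant: after processing indices 0..m-1 the dp array holds kriF at indices < m and 0 elsewhere
theorem kriLoop_inv (L : Nat) : ∀ m : Nat, m ≤ L →
    ((PySem.List.pyRange 0 (m : Int) 1).foldl kriStep (List.replicate L (0 : Int))).length = L ∧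
    ∀ j : Nat, j < L →
      ((PySem.List.pyRange 0 (m : Int) 1).foldl kriStep (List.replicate L (0 : Int))).getD j 0
        = if j < m then kriF j else 0 := by
  intro m
  induction m with
  | zero =>
    intro _
    simp [List.getD]
  | succ m ih =>
    intro hm
    obtain ⟨hlen, hval⟩ := ih (by omega)
    have hsplit : PySem.List.pyRange 0 ((m : Int) + 1) 1
        = PySem.List.pyRange 0 (m : Int) 1 ++ [(m : Int)] :=
      PySem.List.pyRange_one_succ_right (by positivity)
    push_cast
    rw [hsplit, List.foldl_append]
    set dp := (PySem.List.pyRange 0 (m : Int) 1).foldl kriStep (List.replicate L (0 : Int)) with hdp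
    simp only [List.foldl_cons, List.foldl_nil]
    -- the written value equals kriF m
    have hvv : kriStep dp (m : Int) = dp.set m (kriF m) := by
      unfold kriStep
      by_cases h7 : m < 7
      · have : ((m : Int) < 7) := by exact_mod_cast h7
        simp [this, PySem.List.pySetD_natCast, kriF_lt7 h7]
      · have h7' : ¬ ((m : Int) < 7) := by exact_mod_cast h7
        have e3 : (m : Int) - 3 = ((m - 3 : Nat) : Int) := by omega
        have e4 : (m : Int) - 4 = ((m - 4 : Nat) : Int) := by omega
        have e5 : (m : Int) - 5 = ((m - 5 : Nat) : Int) := by omega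
        rw [if_neg h7', e3, e4, e5]
        have g3 := hval (m - 3) (by omega)
        have g4 := hval (m - 4) (by omega)
        have g5 := hval (m - 5) (by omega)
        rw [if_pos (by omega)] at g3 g4 g5
        simp only [PySem.List.pyGetD_natCast, PySem.List.pySetD_natCast, g3, g4, g5]
        rw [kriF_ge7 h7]
    rw [hvv]
    refine ⟨by simp [hlen], ?_⟩
    intro j hj
    rw [List.getD_eq_getElem?_getD, List.getElem?_set]
    by_cases hjm : m = j
    · subst hjm
      simp [hlen, hj]
    · simp only [if_neg hjm]
      have := hval j hj
      rw [List.getD_eq_getElem?_getD] at this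
      rw [this]
      have : j < m + 1 ↔ j < m := by omega
      simp [this]

theorem kriDp0_eq (n : Nat) :
    ((PySem.List.pyRange 0 ((n : Int) + 1) 1).map (fun _ => (0 : Int)))
      = List.replicate (n + 1) (0 : Int) := by
  rw [List.map_const']
  congr 1
  rw [PySem.List.length_pyRange_one]
  omega

-- ===== VERDICT (by name: the statement is the Claim_ definition above) =====
theorem solution_spec : Claim_equal_solution := by
  intro N _
  unfold Spec_solution
  by_cases h : N < 7
  · simp [solution, solution_alt, h]
  · rw [solution_alt_eq N h]
    unfold solution
    simp only [if_neg h]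
    have h0 : 0 ≤ N := by omega
    obtain ⟨n, rfl⟩ := Int.eq_ofNat_of_zero_le h0
    rw [kriDp0_eq n]
    have hnn : ((n : Int) + 1) = ((n + 1 : Nat) : Int) := by push_cast; ring
    rw [hnn]
    obtain ⟨_, hval⟩ := kriLoop_inv (n + 1) (n + 1) (le_refl _)
    have := hval n (by omega)
    rw [if_pos (by omega)] at this
    simp only [PySem.List.pyGetD_natCast]
    rw [this]
    simp
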